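-- pv_equiv track=rewrite | github.com/Slmbyn/Further-Self-Study | rand_practice_files/Python/practice_probs.py | contains_all_numbers
-- ===== SOURCE A (Python) =====
-- def contains_all_numbers(numbers):
--     # empty array to store result
--     result = []
--     n = len(numbers[0])
--     counter = 0
--     # for i in range(n - 2): #range(n-2) determines how long len(result) is and makes sure that the 'j' loop index range can fit inside the array (i.e: ensure that i+3 is a valid idx)
--     while counter <= n-3:
--         window = []
--         for row in numbers:
--             # for j in range(i, i + 3):
--             for col in range(counter, counter + 3):
--                 window.append(row[col])
--         result.append(len(set(window)) == 9)
--         counter += 1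
--     return result
-- ===== SOURCE B (Python) =====
-- def contains_all_numbers(numbers):
--     n = len(numbers[0])
--     if n < 3:
--         return []
--     counts = {}
--
--     def inc(v):
--         counts[v] = counts.get(v, 0) + 1
--
--     def dec(v):
--         c = counts.get(v, 0) - 1
--         if c == 0:
--             del counts[v]
--         else:
--             counts[v] = c
--
--     for row in numbers:
--         for col in range(3):
--             inc(row[col])
--     result = [len(counts) == 9]
--     for i in range(1, n - 2):
--         for row in numbers:
--             dec(row[i - 1])
--             inc(row[i + 2])
--         result.append(len(counts) == 9)
--     return result
-- ===== Notes on version B (the rewrite author's own statement) =====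
-- stated objective: alternative
-- what changed: Replaces A's per-window rebuild (gather 3 columns into a list, build a fresh set, test its size) by a sliding frequency dictionary: the counter for the first 3 columns is built once, then each shift decrements the outgoing column's values (deleting keys that reach zero) and increments the incoming column's, testing len(counts)==9 after each update.
import Mathlib
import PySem

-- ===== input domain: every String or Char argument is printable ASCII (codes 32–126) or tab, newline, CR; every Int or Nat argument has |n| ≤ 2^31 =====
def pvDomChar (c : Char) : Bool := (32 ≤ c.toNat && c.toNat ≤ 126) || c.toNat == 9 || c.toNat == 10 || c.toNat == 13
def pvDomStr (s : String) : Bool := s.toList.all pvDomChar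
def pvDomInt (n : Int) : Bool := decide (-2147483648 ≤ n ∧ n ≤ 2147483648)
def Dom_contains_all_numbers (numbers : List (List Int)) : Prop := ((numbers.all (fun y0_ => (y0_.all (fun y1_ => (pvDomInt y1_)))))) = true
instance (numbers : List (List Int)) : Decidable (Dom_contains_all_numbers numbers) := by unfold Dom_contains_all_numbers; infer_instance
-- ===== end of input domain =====

-- B replaces A's per-window rebuild (gather 3 columns, fresh set, size test) by a sliding
-- frequency dictionary updated incrementally per shift — objective: alternative algorithm.

-- ===== PORT A =====
-- the window-building nested loops of one while-iteration of A
def winA (numbers : List (List Int)) (counter : Int) : List Int :=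
  numbers.foldl (fun window row =>
    (PySem.List.pyRange counter (counter + 3) 1).foldl
      (fun w col => w ++ [PySem.List.pyGetD row col 0]) window) []

-- A's while loop (result.append per iteration, counter += 1)
def loopA (numbers : List (List Int)) (n counter : Int) : List Bool :=
  if counter ≤ n - 3 then
    decide (PySem.Set.len (PySem.Set.ofList (winA numbers counter)) = 9)
      :: loopA numbers n (counter + 1)
  else []
termination_by (n - counter).toNat
decreasing_by omega

def contains_all_numbers (numbers : List (List Int)) : List Bool :=
  loopA numbers (PySem.List.len (PySem.List.pyGetD numbers 0 [])) 0

-- ===== PORT B =====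
-- counts[v] = counts.get(v, 0) + 1
def incD (d : PySem.Dict Int Int) (v : Int) : PySem.Dict Int Int :=
  d.insert v (d.getD v 0 + 1)

-- c = counts.get(v, 0) - 1; if c == 0: del counts[v] else counts[v] = c
def decD (d : PySem.Dict Int Int) (v : Int) : PySem.Dict Int Int :=
  let c := d.getD v 0 - 1
  if c = 0 then d.erase v else d.insert v c

def contains_all_numbers_alt (numbers : List (List Int)) : List Bool :=
  let n := PySem.List.len (PySem.List.pyGetD numbers 0 [])
  if n < 3 then []
  else
    let d0 := numbers.foldl (fun d row =>
      (PySem.List.pyRange 0 3 1).foldl (fun d col => incD d (PySem.List.pyGetD row col 0)) d)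
      PySem.Dict.empty
    ((PySem.List.pyRange 1 (n - 2) 1).foldl
      (fun st i =>
        let d := numbers.foldl
          (fun d row => incD (decD d (PySem.List.pyGetD row (i - 1) 0))
                             (PySem.List.pyGetD row (i + 2) 0)) st.1
        (d, st.2 ++ [decide (PySem.Dict.size d = 9)]))
      (d0, [decide (PySem.Dict.size d0 = 9)])).2

-- ===== PRECONDITION & SPEC =====
-- Pre_ excludes exactly the inputs where A raises IndexError: the empty list (numbers[0]),
-- and ragged inputs whose first row has ≥ 3 columns but some row is shorter than the first.
def Pre_contains_all_numbers (numbers : List (List Int)) : Prop :=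
  numbers ≠ [] ∧
    ((numbers.headD []).length < 3 ∨ ∀ row ∈ numbers, (numbers.headD []).length ≤ row.length)
instance (numbers : List (List Int)) : Decidable (Pre_contains_all_numbers numbers) := by
  unfold Pre_contains_all_numbers; infer_instance

def pvWitness_contains_all_numbers : List (List Int) := [[1,2,3],[4,5,6],[7,8,9]]

def Spec_contains_all_numbers (numbers : List (List Int)) (out : List Bool) : Prop := out = contains_all_numbers_alt numbers
instance (numbers : List (List Int)) (out : List Bool) : Decidable (Spec_contains_all_numbers numbers out) := by unfold Spec_contains_all_numbers; infer_instance

-- ===== CLAIM (what is proved, stated in full; the proofs are below) =====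
def Claim_equal_contains_all_numbers : Prop := ∀ (numbers : List (List Int)), Dom_contains_all_numbers numbers → Pre_contains_all_numbers numbers → Spec_contains_all_numbers numbers (contains_all_numbers numbers)

-- ===== LEMMAS AND PROOFS =====

-- ---- A side: the window list, abstractly ----
theorem pyRange3 (a : Int) : PySem.List.pyRange a (a + 3) 1 = [a, a+1, a+2] := by
  rw [PySem.List.pyRange_one]
  have : (a + 3 - a).toNat = 3 := by omega
  rw [this]
  simp [List.range_succ]

-- the 3-column window at nat position i, via getD (both ports read it through pyGetD _ _ 0)
def Wl (numbers : List (List Int)) (i : Nat) : List Int :=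
  numbers.flatMap (fun r => [r.getD i 0, r.getD (i+1) 0, r.getD (i+2) 0])

theorem winA_eq (numbers : List (List Int)) (i : Nat) :
    winA numbers (i : Int) = Wl numbers i := by
  unfold winA Wl
  have hrow : ∀ (w : List Int) (row : List Int),
      (PySem.List.pyRange (i : Int) ((i : Int) + 3) 1).foldl
        (fun w col => w ++ [PySem.List.pyGetD row col 0]) w
      = w ++ [row.getD i 0, row.getD (i+1) 0, row.getD (i+2) 0] := by
    intro w row
    rw [pyRange3]
    have e1 : ((i : Int) + 1) = ((i + 1 : Nat) : Int) := by push_cast; ring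
    have e2 : ((i : Int) + 2) = ((i + 2 : Nat) : Int) := by push_cast; ring
    simp only [List.foldl_cons, List.foldl_nil, e1, e2, PySem.List.pyGetD_natCast]
    simp
  have hc : numbers.foldl (fun window row =>
        (PySem.List.pyRange (i : Int) ((i : Int) + 3) 1).foldl
          (fun w col => w ++ [PySem.List.pyGetD row col 0]) window) []
      = numbers.foldl (fun window row =>
          window ++ [row.getD i 0, row.getD (i+1) 0, row.getD (i+2) 0]) [] := by
    congr 1
    funext w row
    exact hrow w row
  rw [hc, PySem.List.foldl_append_eq_flatMap]
  simp

-- A's per-window Boolean at nat position i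
def aval (numbers : List (List Int)) (i : Nat) : Bool :=
  decide (PySem.Set.len (PySem.Set.ofList (Wl numbers i)) = 9)

theorem loopA_eq (numbers : List (List Int)) :
    ∀ (k c : Nat) (n : Int), n - 2 - c = k →
      loopA numbers n c = (List.range' c k).map (aval numbers) := by
  intro k
  induction k with
  | zero =>
    intro c n h
    rw [loopA]
    rw [if_neg (by omega)]
    simp
  | succ k ih =>
    intro c n h
    rw [loopA, if_pos (by omega)]
    rw [List.range'_succ]
    simp only [List.map_cons]
    have hc1 : ((c : Int) + 1) = ((c + 1 : Nat) : Int) := by push_cast; ring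
    rw [hc1, ih (c + 1) n (by omega)]
    rw [winA_eq]
    rfl

-- ---- erase on Dict (no prelude lemmas exist for erase; proved here on items directly) ----
theorem keys_erase_int (d : PySem.Dict Int Int) (k : Int) :
    (d.erase k).keys = d.keys.filter (fun x => !(x == k)) := by
  simp [PySem.Dict.erase, PySem.Dict.keys, List.filter_map, Function.comp_def]

theorem nodup_keys_erase_int (d : PySem.Dict Int Int) (k : Int)
    (h : d.keys.Nodup) : (d.erase k).keys.Nodup := by
  rw [keys_erase_int]
  exact h.filter _

theorem find_filter_ne_int (k v : Int) (hvk : v ≠ k) :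
    ∀ l : List (Int × Int),
      List.find? (fun p => p.1 == v) (List.filter (fun p => !p.1 == k) l)
        = List.find? (fun p => p.1 == v) l := by
  intro l
  induction l with
  | nil => rfl
  | cons p rest ih =>
    by_cases hpk : p.1 = k
    · rw [List.filter_cons_of_neg (by simp [hpk])]
      rw [List.find?_cons_of_neg (by simp [hpk]; exact fun h => hvk (h ▸ hpk ▸ rfl))]
      exact ih
    · rw [List.filter_cons_of_pos (by simp [hpk])]
      by_cases hpv : p.1 = v
      · rw [List.find?_cons_of_pos (by simp [hpv]), List.find?_cons_of_pos (by simp [hpv])]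
      · rw [List.find?_cons_of_neg (by simp [hpv]), List.find?_cons_of_neg (by simp [hpv])]
        exact ih

theorem get?_erase_int (d : PySem.Dict Int Int) (k v : Int) :
    (d.erase k).get? v = if v = k then none else d.get? v := by
  simp only [PySem.Dict.erase, PySem.Dict.get?]
  split
  · rename_i hvk
    subst hvk
    rw [List.find?_eq_none.mpr]
    · rfl
    · intro p hp
      have := (List.mem_filter.mp hp).2
      simpa using this
  · rename_i hvk
    rw [find_filter_ne_int k v hvk]

theorem getD_erase_int (d : PySem.Dict Int Int) (k v : Int) :
    (d.erase k).getD v 0 = if v = k then 0 else d.getD v 0 := by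
  rw [PySem.Dict.getD_eq_get?_getD, get?_erase_int]
  split <;> simp [PySem.Dict.getD_eq_get?_getD]

theorem contains_erase_int (d : PySem.Dict Int Int) (k v : Int) :
    (d.erase k).contains v = if v = k then false else d.contains v := by
  rw [PySem.Dict.contains_eq_isSome_get?, get?_erase_int]
  split <;> simp [PySem.Dict.contains_eq_isSome_get?]

-- ---- the sliding-counter invariant ----
-- d is exactly the multiset w: nodup keys, counts match, no zero-count keys
def CInv (d : PySem.Dict Int Int) (w : List Int) : Prop :=
  d.keys.Nodup ∧ (∀ v, d.getD v 0 = (w.count v : Int)) ∧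
    (∀ v, d.contains v = decide (v ∈ w))

theorem Inv_count (d : PySem.Dict Int Int) (w w' : List Int)
    (h : CInv d w) (hc : ∀ v, w.count v = w'.count v) : CInv d w' := by
  obtain ⟨h1, h2, h3⟩ := h
  refine ⟨h1, fun v => by rw [h2, hc], fun v => ?_⟩
  rw [h3]
  simp only [decide_eq_decide, ← List.count_pos_iff, hc]

theorem Inv_empty : CInv PySem.Dict.empty [] := by
  refine ⟨by simp [PySem.Dict.nodup_keys_empty], fun v => by simp, fun v => by simp⟩

theorem Inv_inc (d : PySem.Dict Int Int) (w : List Int) (x : Int) (h : CInv d w) :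
    CInv (incD d x) (x :: w) := by
  obtain ⟨h1, h2, h3⟩ := h
  unfold incD
  refine ⟨PySem.Dict.nodup_keys_insert _ _ _ h1, fun v => ?_, fun v => ?_⟩
  · rw [PySem.Dict.getD_insert, List.count_cons]
    split
    · rename_i hv
      rw [h2, hv]
      push_cast
      simp
    · rename_i hv
      rw [h2]
      simp [Ne.symm hv]
  · rw [PySem.Dict.contains_insert, h3]
    by_cases hv : v = x
    · simp [hv]
    · simp [hv, List.mem_cons]

theorem Inv_dec (d : PySem.Dict Int Int) (w : List Int) (x : Int)
    (h : CInv d (x :: w)) : CInv (decD d x) w := by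
  obtain ⟨h1, h2, h3⟩ := h
  unfold decD
  have hx : d.getD x 0 = ((w.count x : Int) + 1) := by
    rw [h2]; simp [List.count_cons]
  by_cases hz : d.getD x 0 - 1 = 0
  · have hcx : w.count x = 0 := by omega
    rw [if_pos hz]
    refine ⟨nodup_keys_erase_int _ _ h1, fun v => ?_, fun v => ?_⟩
    · rw [getD_erase_int]
      split
      · rename_i hv; rw [hv, hcx]; rfl
      · rename_i hv; rw [h2]; simp [List.count_cons, Ne.symm hv]
    · rw [contains_erase_int]
      split
      · rename_i hv
        subst hv
        symm
        simp [← List.count_pos_iff, hcx]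
      · rename_i hv
        rw [h3]
        simp [hv, List.mem_cons]
  · rw [if_neg hz]
    refine ⟨PySem.Dict.nodup_keys_insert _ _ _ h1, fun v => ?_, fun v => ?_⟩
    · rw [PySem.Dict.getD_insert]
      split
      · rename_i hv; rw [hv, hx]; ring
      · rename_i hv; rw [h2]; simp [List.count_cons, Ne.symm hv]
    · rw [PySem.Dict.contains_insert, h3]
      by_cases hv : v = x
      · subst hv
        simp only [BEq.rfl, Bool.true_or]
        symm
        simp only [decide_eq_true_eq, ← List.count_pos_iff]
        omega
      · simp [hv, List.mem_cons]

theorem Inv_size (d : PySem.Dict Int Int) (w : List Int) (h : CInv d w) :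
    PySem.Dict.size d = (PySem.Set.ofList w).length := by
  obtain ⟨h1, _, h3⟩ := h
  have hmem : ∀ v, v ∈ d.keys ↔ v ∈ PySem.Set.ofList w := by
    intro v
    rw [PySem.Set.mem_ofList, ← PySem.Dict.contains_iff_mem_keys, h3]
    simp
  have hperm : d.keys.Perm (PySem.Set.ofList w) :=
    (List.perm_ext_iff_of_nodup h1 (PySem.Set.nodup_ofList _)).mpr hmem
  have : d.keys.length = (PySem.Set.ofList w).length := hperm.length_eq
  simpa [PySem.Dict.size, PySem.Dict.keys] using this

theorem Inv_size9 (d : PySem.Dict Int Int) (w : List Int) (h : CInv d w) :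
    decide (PySem.Dict.size d = 9)
      = decide (PySem.Set.len (PySem.Set.ofList w) = 9) := by
  rw [Inv_size _ _ h]
  simp only [PySem.Set.len, decide_eq_decide]
  omega

-- count of the 3-column window as a sum over the three column lists
theorem count_Wl (numbers : List (List Int)) (i : Nat) (v : Int) :
    (Wl numbers i).count v
      = (numbers.map (fun r => r.getD i 0)).count v
        + (numbers.map (fun r => r.getD (i+1) 0)).count v
        + (numbers.map (fun r => r.getD (i+2) 0)).count v := by
  unfold Wl
  induction numbers with
  | nil => simp
  | cons r rest ih =>
    simp only [List.flatMap_cons, List.map_cons, List.count_append, List.count_cons,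
      List.count_nil] at *
    omega

-- folding inc over three reads per row appends the rows' triples to the tracked multiset
theorem Inv_init (numbers : List (List Int)) :
    ∀ (d : PySem.Dict Int Int) (w : List Int), CInv d w →
      CInv (numbers.foldl (fun d r =>
            incD (incD (incD d (r.getD 0 0)) (r.getD 1 0)) (r.getD 2 0)) d)
          (w ++ Wl numbers 0) := by
  induction numbers with
  | nil => intro d w h; simpa [Wl] using h
  | cons r rest ih =>
    intro d w h
    have h3 : CInv (incD (incD (incD d (r.getD 0 0)) (r.getD 1 0)) (r.getD 2 0))
        (r.getD 2 0 :: r.getD 1 0 :: r.getD 0 0 :: w) :=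
      Inv_inc _ _ _ (Inv_inc _ _ _ (Inv_inc _ _ _ h))
    have h4 := ih _ _ h3
    apply Inv_count _ _ _ h4
    intro v
    simp only [Wl, List.flatMap_cons, List.count_append, List.count_cons, List.count_nil]
    by_cases h0 : v = r.getD 0 0 <;> by_cases h1 : v = r.getD 1 0 <;> by_cases h2 : v = r.getD 2 0 <;>
      simp [h0, h1, h2] <;> omega

-- one slide over all rows: remove each row's outgoing value, add its incoming one
theorem Inv_slide (out inc : List Int → Int) :
    ∀ (rows : List (List Int)) (d : PySem.Dict Int Int) (M : List Int),
      CInv d (rows.map out ++ M) →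
      CInv (rows.foldl (fun d r => incD (decD d (out r)) (inc r)) d)
          (M ++ rows.map inc) := by
  intro rows
  induction rows with
  | nil => intro d M h; simpa using h
  | cons r rest ih =>
    intro d M h
    simp only [List.map_cons, List.cons_append] at h
    have hd : CInv (decD d (out r)) (rest.map out ++ M) := Inv_dec _ _ _ h
    have hi : CInv (incD (decD d (out r)) (inc r)) (inc r :: (rest.map out ++ M)) :=
      Inv_inc _ _ _ hd
    have hi' : CInv (incD (decD d (out r)) (inc r)) (rest.map out ++ (M ++ [inc r])) := by
      apply Inv_count _ _ _ hi
      intro v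
      by_cases hv : v = inc r <;>
        simp [hv, List.count_cons, List.count_append] <;> omega
    have := ih _ _ hi'
    apply Inv_count _ _ _ this
    intro v
    by_cases hv : v = inc r <;>
      simp [hv, List.count_cons, List.count_append] <;> omega

-- B's main loop, abstracted over the remaining range
theorem loopB_eq (numbers : List (List Int)) :
    ∀ (k i : Nat) (d : PySem.Dict Int Int) (acc : List Bool),
      CInv d (Wl numbers i) →
      (((List.range' (i+1) k).map (fun j : Nat => (j : Int))).foldl
        (fun st x =>
          let d := numbers.foldl
            (fun d row => incD (decD d (PySem.List.pyGetD row (x - 1) 0))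
                               (PySem.List.pyGetD row (x + 2) 0)) st.1
          (d, st.2 ++ [decide (PySem.Dict.size d = 9)]))
        (d, acc)).2
      = acc ++ (List.range' (i+1) k).map (aval numbers) := by
  intro k
  induction k with
  | zero => intro i d acc _; simp
  | succ k ih =>
    intro i d acc hInv
    rw [List.range'_succ]
    simp only [List.map_cons, List.foldl_cons]
    have e1 : ((i + 1 : Nat) : Int) - 1 = (i : Int) := by push_cast; ring
    have e2 : ((i + 1 : Nat) : Int) + 2 = ((i + 3 : Nat) : Int) := by push_cast; ring
    have hstep : (numbers.foldl
        (fun d row => incD (decD d (PySem.List.pyGetD row (((i + 1 : Nat) : Int) - 1) 0))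
                           (PySem.List.pyGetD row (((i + 1 : Nat) : Int) + 2) 0)) d)
        = numbers.foldl (fun d row => incD (decD d (row.getD i 0)) (row.getD (i+3) 0)) d := by
      congr 1
      funext d row
      rw [e1, e2, PySem.List.pyGetD_natCast, PySem.List.pyGetD_natCast]
    have hInv' : CInv (numbers.foldl
        (fun d row => incD (decD d (row.getD i 0)) (row.getD (i+3) 0)) d)
        (Wl numbers (i+1)) := by
      have h0 : CInv d (numbers.map (fun r => r.getD i 0)
          ++ (numbers.map (fun r => r.getD (i+1) 0)
              ++ numbers.map (fun r => r.getD (i+2) 0))) := by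
        apply Inv_count _ _ _ hInv
        intro v
        rw [count_Wl]
        simp only [List.count_append]
        omega
      have h1 := Inv_slide (fun r => r.getD i 0) (fun r => r.getD (i+3) 0) numbers d _ h0
      apply Inv_count _ _ _ h1
      intro v
      rw [count_Wl]
      simp only [List.count_append, show i + 1 + 1 = i + 2 from rfl,
        show i + 1 + 2 = i + 3 from rfl]
    simp only [hstep]
    rw [ih (i+1) _ _ hInv', Inv_size9 _ _ hInv']
    simp [aval, List.append_assoc]

-- ===== VERDICT (by name: the statement is the Claim_ definition above) =====

theorem contains_all_numbers_spec : Claim_equal_contains_all_numbers := by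
  intro numbers _ hpre
  obtain ⟨hne, _⟩ := hpre
  unfold Spec_contains_all_numbers
  cases numbers with
  | nil => exact absurd rfl hne
  | cons r0 rest =>
    have hn : PySem.List.len (PySem.List.pyGetD ((r0 :: rest) : List (List Int)) 0 []) = (r0.length : Int) := by
      rw [PySem.List.pyGetD_zero_cons, PySem.List.len_eq]
    by_cases h3 : r0.length < 3
    · have hA : contains_all_numbers (r0 :: rest) = [] := by
        unfold contains_all_numbers
        rw [hn, loopA, if_neg (by omega)]
      have hB : contains_all_numbers_alt (r0 :: rest) = [] := by
        unfold contains_all_numbers_alt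
        rw [hn, if_pos (by exact_mod_cast by omega)]
      rw [hA, hB]
    · rw [Nat.not_lt] at h3
      have hA : contains_all_numbers (r0 :: rest)
          = (List.range' 0 (r0.length - 2)).map (aval (r0 :: rest)) := by
        unfold contains_all_numbers
        rw [hn]
        exact loopA_eq (r0 :: rest) (r0.length - 2) 0 (r0.length : Int) (by omega)
      -- B side
      have hinit0 : PySem.List.pyRange 0 3 1 = [0, 1, 2] := by decide
      have hinner : ∀ (d : PySem.Dict Int Int) (row : List Int),
          (PySem.List.pyRange 0 3 1).foldl (fun d col => incD d (PySem.List.pyGetD row col 0)) d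
          = incD (incD (incD d (row.getD 0 0)) (row.getD 1 0)) (row.getD 2 0) := by
        intro d row
        rw [hinit0]
        have e0 : (0 : Int) = ((0 : Nat) : Int) := rfl
        have e1 : (1 : Int) = ((1 : Nat) : Int) := rfl
        have e2 : (2 : Int) = ((2 : Nat) : Int) := rfl
        simp only [List.foldl_cons, List.foldl_nil, e0, e1, e2, PySem.List.pyGetD_natCast]
      have hd0 : ((r0 :: rest : List (List Int)).foldl (fun d row =>
            (PySem.List.pyRange 0 3 1).foldl (fun d col => incD d (PySem.List.pyGetD row col 0)) d)
            PySem.Dict.empty)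
          = (r0 :: rest : List (List Int)).foldl (fun d r =>
              incD (incD (incD d (r.getD 0 0)) (r.getD 1 0)) (r.getD 2 0)) PySem.Dict.empty := by
        congr 1
        funext d row
        exact hinner d row
      have hInv0 : CInv ((r0 :: rest : List (List Int)).foldl (fun d r =>
            incD (incD (incD d (r.getD 0 0)) (r.getD 1 0)) (r.getD 2 0)) PySem.Dict.empty)
          (Wl (r0 :: rest) 0) := by
        have := Inv_init (r0 :: rest) PySem.Dict.empty [] Inv_empty
        simpa using this
      have hrange : PySem.List.pyRange 1 ((r0.length : Int) - 2) 1
          = (List.range' 1 (r0.length - 3)).map (fun j : Nat => (j : Int)) := by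
        rw [PySem.List.pyRange_one]
        have : ((r0.length : Int) - 2 - 1).toNat = r0.length - 3 := by omega
        rw [this, List.range'_eq_map_range]
        simp only [List.map_map]
        apply List.map_congr_left
        intro j _
        simp [Function.comp]
      unfold contains_all_numbers_alt
      rw [hn, if_neg (by exact_mod_cast by omega)]
      simp only [hd0, hrange]
      rw [loopB_eq (r0 :: rest) (r0.length - 3) 0 _ _ hInv0]
      rw [Inv_size9 _ _ hInv0]
      rw [hA]
      have hr : List.range' 0 (r0.length - 2) = 0 :: List.range' 1 (r0.length - 3) := by
        have : r0.length - 2 = (r0.length - 3) + 1 := by omega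
        rw [this, List.range'_succ]
      rw [hr]
      simp [aval]
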